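-- pv_equiv track=rewrite | github.com/jeanmidevacc/metaflow-experimentation | hearthstone_deckarchetypeestimator/external.py | build_cardfeatures
-- ===== SOURCE A (Python) =====
-- def build_cardfeatures(deck, all_topcards):
--     features = []
--     for card in all_topcards:
--         if card in deck:
--             features.append(1)
--         else:
--             features.append(0)
--     return features
-- ===== SOURCE B (Python) =====
-- def build_cardfeatures(deck, all_topcards):
--     index = {}
--     for i, card in enumerate(all_topcards):
--         index.setdefault(card, []).append(i)
--     features = [0] * len(all_topcards)
--     for card in deck:
--         for i in index.get(card, []):
--             features[i] = 1
--     return features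
-- ===== Notes on version B (the rewrite author's own statement) =====
-- stated objective: faster
-- what changed: Instead of scanning deck once per top card, B builds a card-to-positions index over all_topcards once, starts from an all-zero vector and marks positions while iterating over deck.
import Mathlib
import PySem

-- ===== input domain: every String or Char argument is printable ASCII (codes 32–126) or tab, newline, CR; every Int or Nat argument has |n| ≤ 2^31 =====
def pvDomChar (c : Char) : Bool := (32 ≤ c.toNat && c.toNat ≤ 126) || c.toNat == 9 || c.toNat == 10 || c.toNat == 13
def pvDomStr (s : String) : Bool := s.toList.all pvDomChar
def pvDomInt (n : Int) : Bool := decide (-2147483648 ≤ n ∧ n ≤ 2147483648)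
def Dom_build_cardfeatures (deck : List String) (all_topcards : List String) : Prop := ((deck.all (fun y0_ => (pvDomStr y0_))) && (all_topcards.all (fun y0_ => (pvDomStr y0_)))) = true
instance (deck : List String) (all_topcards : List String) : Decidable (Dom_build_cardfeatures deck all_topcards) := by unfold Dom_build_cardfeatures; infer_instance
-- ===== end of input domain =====

-- B replaces A's per-top-card scan of deck by a one-pass positions index over
-- all_topcards plus a marking pass over deck (objective: faster).

-- ===== PORT A =====
def build_cardfeatures (deck : List String) (all_topcards : List String) : List Int :=
  all_topcards.foldl
    (fun features card => features ++ [if deck.contains card then (1 : Int) else 0]) []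

-- ===== PORT B =====
-- index: card -> list of positions where it occurs in all_topcards (setdefault/append loop)
def bcIndex (all_topcards : List String) : PySem.Dict String (List Int) :=
  (PySem.List.enumerate all_topcards 0).foldl
    (fun d p => d.modify p.2 [] (· ++ [p.1])) PySem.Dict.empty

def build_cardfeatures_alt (deck : List String) (all_topcards : List String) : List Int :=
  let index := bcIndex all_topcards
  deck.foldl
    (fun features card =>
      (index.getD card []).foldl (fun features i => PySem.List.pySetD features i 1) features)
    (List.replicate all_topcards.length (0 : Int))

-- ===== PRECONDITION & SPEC =====
def Spec_build_cardfeatures (deck : List String) (all_topcards : List String) (out : List Int) : Prop := out = build_cardfeatures_alt deck all_topcards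
instance (deck : List String) (all_topcards : List String) (out : List Int) : Decidable (Spec_build_cardfeatures deck all_topcards out) := by unfold Spec_build_cardfeatures; infer_instance

-- ===== CLAIM (what is proved, stated in full; the proofs are below) =====
def Claim_equal_build_cardfeatures : Prop := ∀ (deck : List String) (all_topcards : List String), Dom_build_cardfeatures deck all_topcards → Spec_build_cardfeatures deck all_topcards (build_cardfeatures deck all_topcards)

-- ===== LEMMAS AND PROOFS =====

-- the index lists exactly the positions of c in all_topcards
lemma bcIndex_getD (ats : List String) (c : String) :
    (bcIndex ats).getD c [] =
      ((PySem.List.enumerate ats 0).filter (fun p => p.2 == c)).map (·.1) := by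
  have h : bcIndex ats =
      ((PySem.List.enumerate ats 0).map (fun p => (p.2, p.1))).foldl
        (fun d q => d.modify q.1 [] (· ++ [q.2])) PySem.Dict.empty := by
    rw [List.foldl_map]; rfl
  rw [h, PySem.Dict.getD_foldl_modify_append, PySem.Dict.getD_empty]
  rw [List.filter_map, List.map_map]
  simp [Function.comp_def]

lemma bcIndex_mem (ats : List String) (c : String) (i : Int) :
    i ∈ (bcIndex ats).getD c [] ↔ ∃ k : Nat, ∃ _ : k < ats.length, i = (k : Int) ∧ ats[k] = c := by
  rw [bcIndex_getD]
  simp only [List.mem_map, List.mem_filter, PySem.List.mem_enumerate_iff]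
  constructor
  · rintro ⟨p, ⟨⟨k, hk, rfl⟩, hc⟩, rfl⟩
    exact ⟨k, hk, by simp, by simpa using hc⟩
  · rintro ⟨k, hk, rfl, hc⟩
    exact ⟨(0 + (k : Int), ats[k]), ⟨⟨k, hk, rfl⟩, by simpa using hc⟩, by simp⟩

lemma bcIndex_nonneg (ats : List String) (c : String) :
    ∀ j ∈ (bcIndex ats).getD c [], 0 ≤ j := by
  intro j hj
  rcases (bcIndex_mem ats c j).1 hj with ⟨k, _, rfl, _⟩
  exact Int.natCast_nonneg k

lemma bcMark_length (is : List Int) (f : List Int) :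
    (is.foldl (fun f i => PySem.List.pySetD f i 1) f).length = f.length := by
  induction is generalizing f with
  | nil => rfl
  | cons j is ih => simp [ih, PySem.List.length_pySetD]

lemma bcMark_get? (is : List Int) (hnn : ∀ j ∈ is, 0 ≤ j) (f : List Int) (i : Nat)
    (h : i < f.length) :
    (is.foldl (fun f i => PySem.List.pySetD f i 1) f)[i]? =
      if (i : Int) ∈ is then some 1 else f[i]? := by
  induction is generalizing f with
  | nil => simp
  | cons j is ih =>
    have hj : 0 ≤ j := hnn j (by simp)
    have hset : PySem.List.pySetD f j 1 = f.set j.toNat 1 :=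
      PySem.List.pySetD_of_nonneg f 1 hj
    rw [List.foldl_cons, hset,
      ih (fun a ha => hnn a (List.mem_cons_of_mem _ ha)) _ (by simpa using h)]
    by_cases hin : (i : Int) ∈ is
    · simp [hin]
    · rw [if_neg hin]
      rcases eq_or_ne j.toNat i with he | he
      · rw [← he, List.getElem?_set_self (by omega),
          if_pos (by have hji : ((j.toNat : Int)) = j := by omega
                     rw [hji]; exact List.mem_cons_self)]
      · rw [List.getElem?_set_ne he, if_neg (by simp [List.mem_cons, hin]; omega)]

lemma bcFold_length (deck : List String) (idx : String → List Int) (f : List Int) :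
    (deck.foldl
        (fun f card => (idx card).foldl (fun f i => PySem.List.pySetD f i 1) f) f).length =
      f.length := by
  induction deck generalizing f with
  | nil => rfl
  | cons c deck ih => rw [List.foldl_cons, ih, bcMark_length]

lemma bcFold_get? (deck : List String) (idx : String → List Int)
    (hnn : ∀ c, ∀ j ∈ idx c, 0 ≤ j) (f : List Int) (i : Nat) (h : i < f.length) :
    (deck.foldl
        (fun f card => (idx card).foldl (fun f i => PySem.List.pySetD f i 1) f) f)[i]? =
      if ∃ c ∈ deck, (i : Int) ∈ idx c then some 1 else f[i]? := by
  induction deck generalizing f with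
  | nil => simp
  | cons c deck ih =>
    rw [List.foldl_cons, ih _ (by rw [bcMark_length]; exact h),
      bcMark_get? (idx c) (hnn c) f i h]
    by_cases hd : ∃ c' ∈ deck, (i : Int) ∈ idx c'
    · simp [hd]
    · by_cases hc : (i : Int) ∈ idx c
      · simp [hd, hc]
      · have hno : ¬ ∃ c' ∈ c :: deck, (i : Int) ∈ idx c' := by
          simp only [List.mem_cons]; rintro ⟨c', (rfl | hm), hi⟩
          exacts [hc hi, hd ⟨c', hm, hi⟩]
        rw [if_neg hno, if_neg hd, if_neg hc]

lemma bcAlt_get? (deck ats : List String) (i : Nat) (h : i < ats.length) :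
    (build_cardfeatures_alt deck ats)[i]? =
      some (if ats[i] ∈ deck then 1 else 0) := by
  unfold build_cardfeatures_alt
  rw [bcFold_get? deck _ (bcIndex_nonneg ats) _ i (by simpa using h)]
  by_cases hm : ats[i] ∈ deck
  · have hex : ∃ c ∈ deck, (i : Int) ∈ (bcIndex ats).getD c [] :=
      ⟨ats[i], hm, (bcIndex_mem ats ats[i] i).2 ⟨i, h, rfl, rfl⟩⟩
    simp [hex, hm]
  · have hno : ¬ ∃ c ∈ deck, (i : Int) ∈ (bcIndex ats).getD c [] := by
      rintro ⟨c, hc, hi⟩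
      rcases (bcIndex_mem ats c i).1 hi with ⟨k, hk, hik, hkc⟩
      have hki : k = i := by omega
      subst hki
      exact (hkc ▸ hm) hc
    simp [hno, hm, h]

lemma bcAlt_length (deck ats : List String) :
    (build_cardfeatures_alt deck ats).length = ats.length := by
  unfold build_cardfeatures_alt
  rw [bcFold_length]; simp

-- ===== VERDICT (by name: the statement is the Claim_ definition above) =====
theorem build_cardfeatures_spec : Claim_equal_build_cardfeatures := by
  intro deck ats _
  unfold Spec_build_cardfeatures
  have hA : build_cardfeatures deck ats =
      ats.map (fun card => if deck.contains card then (1 : Int) else 0) := by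
    unfold build_cardfeatures
    rw [PySem.List.foldl_append_singleton_eq_map]; rfl
  apply List.ext_getElem?
  intro i
  by_cases h : i < ats.length
  · rw [hA, bcAlt_get? deck ats i h, List.getElem?_map,
      List.getElem?_eq_getElem h]
    simp
  · rw [List.getElem?_eq_none (by rw [hA]; simpa using h),
      List.getElem?_eq_none (by rw [bcAlt_length]; omega)]
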